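-- pv_equiv track=rewrite | github.com/ljhwang/cig_tools | Licensing_Program/copyright_ranking/manual_classification.py | _islice_groups
-- ===== SOURCE A (Python) =====
-- import itertools
--
-- def _islice_groups(iterable, glength):
--     iterable, iter_copy = itertools.tee(iterable)
--     count = 0
--     group = list(itertools.islice(iter_copy, glength))
--
--     while group:
--         yield group
--         count += glength
--         iterable, iter_copy = itertools.tee(iterable)
--         group = list(
--             itertools.islice(iter_copy, count, count + glength)
--         )
-- ===== SOURCE B (Python) =====
-- def _islice_groups(iterable, glength):
--     group = []
--     for item in iterable:
--         group.append(item)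
--         if len(group) == glength:
--             yield group
--             group = []
--     if group:
--         yield group
-- ===== Notes on version B (the rewrite author's own statement) =====
-- stated objective: idiomatic
-- what changed: B is a single forward pass with a growing buffer flushed at the threshold, instead of re-tee-ing the iterator and re-slicing it from the start with itertools.islice for every chunk.
-- outside the precondition, e.g. on _islice_groups([1, 2], 0): A returns [], B returns [[1, 2]]; on _islice_groups([1], -1): A raises ValueError, B returns [[1]]
import Mathlib
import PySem

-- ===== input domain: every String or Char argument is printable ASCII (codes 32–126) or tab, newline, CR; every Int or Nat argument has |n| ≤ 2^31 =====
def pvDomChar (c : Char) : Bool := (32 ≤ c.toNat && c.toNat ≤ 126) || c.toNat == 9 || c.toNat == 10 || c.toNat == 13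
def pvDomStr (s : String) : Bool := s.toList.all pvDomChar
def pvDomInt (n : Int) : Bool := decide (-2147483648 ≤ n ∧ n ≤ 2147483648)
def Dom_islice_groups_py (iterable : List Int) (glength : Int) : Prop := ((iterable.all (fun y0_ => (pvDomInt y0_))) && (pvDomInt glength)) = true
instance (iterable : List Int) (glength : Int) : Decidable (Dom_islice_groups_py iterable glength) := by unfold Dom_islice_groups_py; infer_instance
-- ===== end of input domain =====

-- B replaces A's repeated tee-and-reslice-from-the-start with one forward pass over the
-- elements maintaining a buffer flushed at the threshold (return-value equivalence; both are
-- generators, materialised here as the list of yielded groups).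

-- ===== PORT A =====
-- A's while-loop: each round reads the slice iterable[count : count+glength]; the first round
-- (count = 0) is Python's initial `islice(iter_copy, glength)` = iterable[0:glength].
-- Fuel = length+1 bounds the rounds (each successful round consumes ≥ 1 element when glength ≥ 1).
def isliceA_loop (iterable : List Int) (glength : Int) : Nat → Int → List (List Int)
  | 0, _ => []
  | fuel + 1, count =>
    let group := PySem.List.slice iterable (some count) (some (count + glength))
    if group = [] then []
    else group :: isliceA_loop iterable glength fuel (count + glength)

def islice_groups_py (iterable : List Int) (glength : Int) : List (List Int) :=
  isliceA_loop iterable glength (iterable.length + 1) 0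

-- ===== PORT B =====
-- B's for-loop: append each item to `group`, flush when len(group) == glength; final flush if non-empty.
def isliceB_loop (glength : Int) : List Int → List Int → List (List Int)
  | [], group => if group = [] then [] else [group]
  | x :: xs, group =>
    let group' := group ++ [x]
    if (group'.length : Int) = glength then group' :: isliceB_loop glength xs []
    else isliceB_loop glength xs group'

def islice_groups_py_alt (iterable : List Int) (glength : Int) : List (List Int) :=
  isliceB_loop glength iterable []

-- ===== PRECONDITION & SPEC =====
-- Pre_ excludes glength < 0, on which A raises ValueError (islice rejects negative stops), and
-- the degenerate glength = 0, on which A's empty result is an accident of islice's 0-stop and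
-- B's single whole-list group is equally defensible — neither behaviour is specified for
-- chunk size 0.
def Pre_islice_groups_py (iterable : List Int) (glength : Int) : Prop := 1 ≤ glength
instance (iterable : List Int) (glength : Int) : Decidable (Pre_islice_groups_py iterable glength) := by unfold Pre_islice_groups_py; infer_instance

def pvWitness_islice_groups_py : List Int × Int := ([1, 2, 3, 4, 5], 2)

def Spec_islice_groups_py (iterable : List Int) (glength : Int) (out : List (List Int)) : Prop := out = islice_groups_py_alt iterable glength
instance (iterable : List Int) (glength : Int) (out : List (List Int)) : Decidable (Spec_islice_groups_py iterable glength out) := by unfold Spec_islice_groups_py; infer_instance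

-- ===== CLAIM (what is proved, stated in full; the proofs are below) =====
def Claim_equal_islice_groups_py : Prop := ∀ (iterable : List Int) (glength : Int), Dom_islice_groups_py iterable glength → Pre_islice_groups_py iterable glength → Spec_islice_groups_py iterable glength (islice_groups_py iterable glength)

-- ===== LEMMAS AND PROOFS =====

-- Reference chunking: consecutive groups of g elements (used only in the proofs).
def chunk (g : Nat) : List Int → List (List Int)
  | [] => []
  | x :: xs => (x :: xs.take (g - 1)) :: chunk g (xs.drop (g - 1))
  termination_by xs => xs.length
  decreasing_by simp

theorem chunk_nil (g : Nat) : chunk g [] = [] := by rw [chunk.eq_def]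

theorem chunk_cons (g : Nat) (x : Int) (xs : List Int) :
    chunk g (x :: xs) = (x :: xs.take (g - 1)) :: chunk g (xs.drop (g - 1)) := by
  rw [chunk.eq_def]

theorem chunk_eq (g : Nat) (hg : 1 ≤ g) (xs : List Int) :
    chunk g xs = if xs = [] then [] else xs.take g :: chunk g (xs.drop g) := by
  cases xs with
  | nil => simp [chunk_nil]
  | cons x xs =>
    rw [chunk_cons, if_neg (List.cons_ne_nil x xs)]
    obtain ⟨g', rfl⟩ : ∃ g', g = g' + 1 := ⟨g - 1, by omega⟩
    simp

theorem isliceA_loop_eq_chunk (iterable : List Int) (g : Int) (hg : 1 ≤ g) :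
    ∀ (fuel : Nat) (c : Nat), iterable.length - c < fuel →
      isliceA_loop iterable g fuel (c : Int) = chunk g.toNat (iterable.drop c) := by
  intro fuel
  induction fuel with
  | zero => intro c h; omega
  | succ fuel ih =>
    intro c h
    have hslice : PySem.List.slice iterable (some (c : Int)) (some ((c : Int) + g))
        = (iterable.drop c).take g.toNat := by
      rw [PySem.List.slice_toNat iterable (by positivity) (by omega)]
      congr 1
      omega
    simp only [isliceA_loop, hslice]
    rw [chunk_eq g.toNat (by omega)]
    by_cases hd : iterable.drop c = []
    · simp [hd]
    · have h1 : (iterable.drop c).take g.toNat ≠ [] := by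
        simp [List.take_eq_nil_iff, hd]
        omega
      rw [if_neg h1, if_neg hd]
      have hcg : ((c : Int) + g) = ((c + g.toNat : Nat) : Int) := by push_cast; omega
      have hlen : iterable.length - (c + g.toNat) < fuel := by
        have : c < iterable.length := by
          by_contra hc
          exact hd (List.drop_eq_nil_of_le (by omega))
        omega
      rw [hcg, ih (c + g.toNat) hlen, List.drop_drop]

theorem isliceB_loop_eq_chunk (g : Int) (hg : 1 ≤ g) :
    ∀ (xs : List Int) (acc : List Int), (acc.length : Int) < g →
      isliceB_loop g xs acc =
        if acc ++ xs = [] then []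
        else (acc ++ xs.take (g.toNat - acc.length)) :: chunk g.toNat (xs.drop (g.toNat - acc.length)) := by
  intro xs
  induction xs with
  | nil =>
    intro acc hacc
    by_cases ha : acc = [] <;> simp [isliceB_loop, ha, chunk_nil]
  | cons x xs ih =>
    intro acc hacc
    have hne : acc ++ x :: xs ≠ [] := by simp
    rw [if_neg hne]
    simp only [isliceB_loop]
    by_cases hfull : ((acc ++ [x]).length : Int) = g
    · rw [if_pos hfull]
      have h1 : g.toNat - acc.length = 1 := by simp at hfull; omega
      rw [ih [] (by simp; omega), h1]
      simp [← chunk_eq g.toNat (by omega)]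
    · rw [if_neg hfull]
      have hlt : ((acc ++ [x]).length : Int) < g := by simp at hfull ⊢; omega
      rw [ih (acc ++ [x]) hlt]
      rw [if_neg (by simp)]
      have h2 : ∃ k, g.toNat - acc.length = k + 1 ∧ g.toNat - (acc ++ [x]).length = k := by
        simp at hfull ⊢; omega
      obtain ⟨k, hk1, hk2⟩ := h2
      rw [hk1, hk2]
      simp

-- ===== VERDICT (by name: the statement is the Claim_ definition above) =====
theorem islice_groups_py_spec : Claim_equal_islice_groups_py := by
  intro iterable glength _ hpre
  have hg : 1 ≤ glength := hpre
  show islice_groups_py iterable glength = islice_groups_py_alt iterable glength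
  unfold islice_groups_py islice_groups_py_alt
  have hA := isliceA_loop_eq_chunk iterable glength hg (iterable.length + 1) 0 (by omega)
  have hB := isliceB_loop_eq_chunk glength hg iterable [] (by simp; omega)
  simp only [Nat.cast_zero] at hA
  rw [hA, hB, chunk_eq glength.toNat (by omega)]
  simp
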